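-- pv_equiv track=rewrite | github.com/1r00t/qr-gen | utils/pattern_mask.py | _is_alignment_within_finder
-- ===== SOURCE A (Python) =====
-- def _is_alignment_within_finder(pos, qr_size):
--     x, y = pos
--     finder_positions = [(0, 0), (0, qr_size - 7), (qr_size - 7, 0)]
--     alignment_size = 5
--
--     for fp_x, fp_y in finder_positions:
--         if any(
--             (x + i, y + j)
--             in [(fp_x + dx, fp_y + dy) for dx in range(7) for dy in range(7)]
--             for i in range(alignment_size)
--             for j in range(alignment_size)
--         ):
--             return False
--
--     return True
-- ===== SOURCE B (Python) =====
-- def _is_alignment_within_finder(pos, qr_size):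
--     x, y = pos
--     return all(
--         not (x <= fp_x + 6 and fp_x <= x + 4 and y <= fp_y + 6 and fp_y <= y + 4)
--         for fp_x, fp_y in [(0, 0), (0, qr_size - 7), (qr_size - 7, 0)]
--     )
-- ===== Notes on version B (the rewrite author's own statement) =====
-- stated objective: faster
-- what changed: Replaces the enumeration of the 49 finder cells and the 25-cell membership scan with a closed-form rectangle-intersection test per finder.
import Mathlib
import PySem

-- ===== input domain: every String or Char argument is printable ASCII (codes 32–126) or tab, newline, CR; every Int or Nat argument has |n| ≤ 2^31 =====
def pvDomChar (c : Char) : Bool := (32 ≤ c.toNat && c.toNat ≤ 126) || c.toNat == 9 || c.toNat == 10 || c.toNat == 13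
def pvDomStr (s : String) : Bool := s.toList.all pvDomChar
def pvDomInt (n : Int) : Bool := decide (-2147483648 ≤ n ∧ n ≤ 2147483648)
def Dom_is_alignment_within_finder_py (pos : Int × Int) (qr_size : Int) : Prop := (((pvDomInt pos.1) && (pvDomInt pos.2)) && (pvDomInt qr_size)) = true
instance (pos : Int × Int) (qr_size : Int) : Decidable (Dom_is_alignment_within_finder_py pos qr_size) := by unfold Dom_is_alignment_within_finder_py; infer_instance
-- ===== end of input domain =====

-- B replaces the 49-cell enumeration + 25-cell membership scan by a closed-form
-- rectangle-intersection test per finder (constant-factor faster, same results).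


-- ===== PORT A =====
-- the list comprehension [(fp_x+dx, fp_y+dy) for dx in range(7) for dy in range(7)]
def pvFinderCells (fp_x fp_y : Int) : List (Int × Int) :=
  (PySem.List.pyRange 0 7 1).flatMap (fun dx =>
    (PySem.List.pyRange 0 7 1).map (fun dy => (fp_x + dx, fp_y + dy)))

-- any((x+i, y+j) in cells for i in range(5) for j in range(5))
def pvAnyOverlap (x y fp_x fp_y : Int) : Bool :=
  (PySem.List.pyRange 0 5 1).any (fun i =>
    (PySem.List.pyRange 0 5 1).any (fun j =>
      (pvFinderCells fp_x fp_y).contains (x + i, y + j)))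

-- the for-loop over finder_positions with early `return False`
def pvFinderLoop (x y : Int) : List (Int × Int) → Bool
  | [] => true
  | (fp_x, fp_y) :: rest =>
      if pvAnyOverlap x y fp_x fp_y then false else pvFinderLoop x y rest

def is_alignment_within_finder_py (pos : Int × Int) (qr_size : Int) : Bool :=
  let x := pos.1
  let y := pos.2
  let finder_positions : List (Int × Int) := [(0, 0), (0, qr_size - 7), (qr_size - 7, 0)]
  pvFinderLoop x y finder_positions

-- ===== PORT B =====
def is_alignment_within_finder_py_alt (pos : Int × Int) (qr_size : Int) : Bool :=
  let x := pos.1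
  let y := pos.2
  ([(0, 0), (0, qr_size - 7), (qr_size - 7, 0)] : List (Int × Int)).all
    (fun fp => !(decide (x ≤ fp.1 + 6 ∧ fp.1 ≤ x + 4 ∧ y ≤ fp.2 + 6 ∧ fp.2 ≤ y + 4)))

-- ===== PRECONDITION & SPEC =====
def Spec_is_alignment_within_finder_py (pos : Int × Int) (qr_size : Int) (out : Bool) : Prop := out = is_alignment_within_finder_py_alt pos qr_size
instance (pos : Int × Int) (qr_size : Int) (out : Bool) : Decidable (Spec_is_alignment_within_finder_py pos qr_size out) := by unfold Spec_is_alignment_within_finder_py; infer_instance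

-- ===== CLAIM (what is proved, stated in full; the proofs are below) =====
def Claim_equal_is_alignment_within_finder_py : Prop := ∀ (pos : Int × Int) (qr_size : Int), Dom_is_alignment_within_finder_py pos qr_size → Spec_is_alignment_within_finder_py pos qr_size (is_alignment_within_finder_py pos qr_size)

-- ===== LEMMAS AND PROOFS =====
theorem pvMem_cells (x y fp_x fp_y : Int) :
    (x, y) ∈ pvFinderCells fp_x fp_y ↔
      fp_x ≤ x ∧ x ≤ fp_x + 6 ∧ fp_y ≤ y ∧ y ≤ fp_y + 6 := by
  simp only [pvFinderCells, List.mem_flatMap, List.mem_map, PySem.List.mem_pyRange_one,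
    Prod.mk.injEq]
  constructor
  · rintro ⟨dx, ⟨h0, h7⟩, dy, ⟨g0, g7⟩, hx, hy⟩
    omega
  · rintro ⟨h1, h2, h3, h4⟩
    exact ⟨x - fp_x, by omega, y - fp_y, by omega, by omega, by omega⟩

theorem pvOverlap_eq (x y fp_x fp_y : Int) :
    pvAnyOverlap x y fp_x fp_y =
      decide (x ≤ fp_x + 6 ∧ fp_x ≤ x + 4 ∧ y ≤ fp_y + 6 ∧ fp_y ≤ y + 4) := by
  rw [Bool.eq_iff_iff]
  simp only [pvAnyOverlap, List.any_eq_true, PySem.List.mem_pyRange_one,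
    List.contains_eq_mem, pvMem_cells, decide_eq_true_eq]
  constructor
  · rintro ⟨i, ⟨hi0, hi5⟩, j, ⟨hj0, hj5⟩, h1, h2, h3, h4⟩
    omega
  · rintro ⟨h1, h2, h3, h4⟩
    exact ⟨max 0 (fp_x - x), by omega, max 0 (fp_y - y), by omega,
      by omega, by omega, by omega, by omega⟩

-- ===== VERDICT (by name: the statement is the Claim_ definition above) =====
theorem is_alignment_within_finder_py_spec : Claim_equal_is_alignment_within_finder_py := by
  intro pos qr_size _
  unfold Spec_is_alignment_within_finder_py
  simp only [is_alignment_within_finder_py, is_alignment_within_finder_py_alt,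
    pvFinderLoop, pvOverlap_eq, List.all_cons, List.all_nil]
  by_cases h1 : pos.1 ≤ (0:Int) + 6 ∧ (0:Int) ≤ pos.1 + 4 ∧ pos.2 ≤ (0:Int) + 6 ∧ (0:Int) ≤ pos.2 + 4 <;>
    by_cases h2 : pos.1 ≤ (0:Int) + 6 ∧ (0:Int) ≤ pos.1 + 4 ∧ pos.2 ≤ qr_size - 7 + 6 ∧ qr_size - 7 ≤ pos.2 + 4 <;>
    by_cases h3 : pos.1 ≤ qr_size - 7 + 6 ∧ qr_size - 7 ≤ pos.1 + 4 ∧ pos.2 ≤ (0:Int) + 6 ∧ (0:Int) ≤ pos.2 + 4 <;>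
    simp [h1, h2, h3]
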